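-- pv_equiv track=rewrite | github.com/Aasthaengg/IBMdataset | Python_codes/p02270/s629812981.py | unit_check
-- ===== SOURCE A (Python) =====
-- def unit_check(n, k, w_list, P):
--     i = 0
--     for j in range(k):
--         weight = 0
--         while weight + w_list[i] <= P:
--             weight += w_list[i]
--             i += 1
--             if i == n:
--                 return 1
--     return 0
-- ===== SOURCE B (Python) =====
-- def unit_check(n, k, w_list, P):
--     trucks = 1
--     weight = 0
--     for w in w_list[:n]:
--         if weight + w <= P:
--             weight += w
--         else:
--             trucks += 1
--             weight = w
--             if weight > P:
--                 return 0
--     return 1 if trucks <= k else 0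
-- ===== Notes on version B (the rewrite author's own statement) =====
-- stated objective: simpler
-- what changed: Replaces the nested truck loop with an explicit package index and mid-loop early return by a single pass over the first n packages that maintains a truck counter and current load, comparing the counter with k at the end.
-- outside the precondition, e.g. on unit_check(0, 1, [5], 3): A returns 0, B returns 1
import Mathlib
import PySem

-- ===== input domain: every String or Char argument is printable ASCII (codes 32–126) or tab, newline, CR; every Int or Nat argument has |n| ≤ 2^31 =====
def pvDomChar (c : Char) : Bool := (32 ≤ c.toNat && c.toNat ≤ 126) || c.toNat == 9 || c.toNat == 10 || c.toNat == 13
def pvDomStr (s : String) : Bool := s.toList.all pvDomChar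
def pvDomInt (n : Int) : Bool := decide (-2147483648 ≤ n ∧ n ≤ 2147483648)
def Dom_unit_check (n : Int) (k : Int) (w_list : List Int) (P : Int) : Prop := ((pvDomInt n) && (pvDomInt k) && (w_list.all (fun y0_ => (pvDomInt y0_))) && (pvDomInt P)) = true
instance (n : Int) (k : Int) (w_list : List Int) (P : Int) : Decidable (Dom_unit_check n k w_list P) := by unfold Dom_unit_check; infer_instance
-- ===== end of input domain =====

-- B replaces A's nested truck loop (explicit package index, per-truck restart, mid-loop
-- early return) by a single pass over the first n packages maintaining a truck counter
-- and the current load, compared with k at the end: simpler control structure.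

-- ===== PORT A =====
-- A's inner 'while weight + w_list[i] <= P' loop; fuel bounds the steps (each step
-- increments i, so w_list.length + 1 steps suffice before the return or an IndexError).
-- Sum.inl r = 'return r' escaping the whole function; Sum.inr i = loop exit with index i.
-- 'none' from pyGet? is Python's IndexError (outside Pre_); we return Sum.inl 0 there.
def pvInnerA (n : Int) (P : Int) (w_list : List Int) : Nat → Int → Int → Sum Int Int
  | 0, _, _ => Sum.inl 0
  | Nat.succ f, i, weight =>
    match PySem.List.pyGet? w_list i with
    | none => Sum.inl 0
    | some w =>
      if weight + w ≤ P then
        if i + 1 = n then Sum.inl 1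
        else pvInnerA n P w_list f (i + 1) (weight + w)
      else Sum.inr i

-- A's outer 'for j in range(k)' loop over the remaining truck count.
def pvOuterA (n : Int) (P : Int) (w_list : List Int) : Nat → Int → Int
  | 0, _ => 0
  | Nat.succ t, i =>
    match pvInnerA n P w_list (w_list.length + 1) i 0 with
    | Sum.inl r => r
    | Sum.inr i' => pvOuterA n P w_list t i'

def unit_check (n : Int) (k : Int) (w_list : List Int) (P : Int) : Int :=
  pvOuterA n P w_list k.toNat 0

-- ===== PORT B =====
-- Source B's single for-loop over w_list[:n] with state (trucks, weight).
def pvGoB (k : Int) (P : Int) : List Int → Int → Int → Int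
  | [], trucks, _ => if trucks ≤ k then 1 else 0
  | w :: ws, trucks, weight =>
    if weight + w ≤ P then pvGoB k P ws trucks (weight + w)
    else if P < w then 0
    else pvGoB k P ws (trucks + 1) w

def unit_check_alt (n : Int) (k : Int) (w_list : List Int) (P : Int) : Int :=
  pvGoB k P (PySem.List.slice w_list none (some n)) 1 0

-- ===== PRECONDITION & SPEC =====
-- Pre_ admits every k ≤ 0 (A returns 0 without touching the list) and otherwise requires
-- 1 ≤ n ≤ len(w_list); it excludes k > 0 with n < 1 or n > len(w_list): there n disagrees
-- with the actual package list, and A's index walk either raises IndexError or returns a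
-- value that is an accident of which packages happen to fit (e.g. n = 0 never stops the walk).
def Pre_unit_check (n : Int) (k : Int) (w_list : List Int) (P : Int) : Prop :=
  k ≤ 0 ∨ (1 ≤ n ∧ n ≤ w_list.length)

instance (n : Int) (k : Int) (w_list : List Int) (P : Int) : Decidable (Pre_unit_check n k w_list P) := by unfold Pre_unit_check; infer_instance

def pvWitness_unit_check : Int × Int × List Int × Int := (3, 2, [4, 1, 3], 5)

def Spec_unit_check (n : Int) (k : Int) (w_list : List Int) (P : Int) (out : Int) : Prop := out = unit_check_alt n k w_list P
instance (n : Int) (k : Int) (w_list : List Int) (P : Int) (out : Int) : Decidable (Spec_unit_check n k w_list P out) := by unfold Spec_unit_check; infer_instance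

-- ===== CLAIM (what is proved, stated in full; the proofs are below) =====
def Claim_equal_unit_check : Prop := ∀ (n : Int) (k : Int) (w_list : List Int) (P : Int), Dom_unit_check n k w_list P → Pre_unit_check n k w_list P → Spec_unit_check n k w_list P (unit_check n k w_list P)

-- ===== LEMMAS AND PROOFS =====

-- List-level model of A's inner loop: walk the remaining packages while they fit.
def pvWalk (P : Int) : List Int → Int → Sum Int (List Int)
  | [], _ => Sum.inl 1
  | w :: ws, weight =>
    if weight + w ≤ P then pvWalk P ws (weight + w) else Sum.inr (w :: ws)

-- List-level model of A's outer loop.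
def pvLoopL (P : Int) : Nat → List Int → Int
  | 0, _ => 0
  | Nat.succ t, s =>
    match pvWalk P s 0 with
    | Sum.inl r => r
    | Sum.inr s' => pvLoopL P t s'

-- Number of extra trucks the greedy needs beyond the current one (none = some package
-- never fits an empty truck).
def pvNeed? (P : Int) : List Int → Int → Option Nat
  | [], _ => some 0
  | w :: ws, weight =>
    if weight + w ≤ P then pvNeed? P ws (weight + w)
    else if P < w then none
    else (pvNeed? P ws w).map (· + 1)

theorem pvInnerA_corr (n P : Int) (w_list : List Int) :
    ∀ (f : Nat) (i weight : Int), 0 ≤ i → i < n → n ≤ w_list.length →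
      (n.toNat - i.toNat) ≤ f →
      (pvInnerA n P w_list f i weight = Sum.inl 1 ∧
        pvWalk P ((w_list.take n.toNat).drop i.toNat) weight = Sum.inl 1) ∨
      (∃ i', pvInnerA n P w_list f i weight = Sum.inr i' ∧
        pvWalk P ((w_list.take n.toNat).drop i.toNat) weight =
          Sum.inr ((w_list.take n.toNat).drop i'.toNat) ∧ 0 ≤ i' ∧ i' < n) := by
  intro f
  induction f with
  | zero => intro i weight h0 hn hlen hf; omega
  | succ f ih =>
    intro i weight h0 hn hlen hf
    have hi : i.toNat < n.toNat := by omega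
    have hilen : i.toNat < w_list.length := by omega
    have hlt : i < (w_list.length : Int) := by omega
    have hget : PySem.List.pyGet? w_list i = some w_list[i.toNat] :=
      PySem.List.pyGet?_eq_some_getElem (xs := w_list) h0 hlt
    have hdrop : (w_list.take n.toNat).drop i.toNat =
        w_list[i.toNat] :: (w_list.take n.toNat).drop (i.toNat + 1) := by
      have h1 : i.toNat < (w_list.take n.toNat).length := by
        simp [List.length_take]; omega
      rw [List.drop_eq_getElem_cons h1]
      congr 1
      simp [List.getElem_take]
    rw [hdrop]
    simp only [pvInnerA, hget, pvWalk]
    by_cases hfit : weight + w_list[i.toNat] ≤ P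
    · simp only [if_pos hfit]
      by_cases hend : i + 1 = n
      · left
        constructor
        · rw [if_pos hend]
        · have : (w_list.take n.toNat).drop (i.toNat + 1) = [] := by
            apply List.drop_eq_nil_of_le
            simp [List.length_take]; omega
          rw [this, pvWalk]
      · simp only [if_neg hend]
        have hrec := ih (i + 1) (weight + w_list[i.toNat]) (by omega) (by omega) hlen (by omega)
        have hti : (i + 1).toNat = i.toNat + 1 := by omega
        rw [hti] at hrec
        exact hrec
    · right
      refine ⟨i, ?_, ?_, h0, hn⟩
      · simp [hfit]
      · rw [hdrop]
        simp [hfit]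

theorem pvOuterA_corr (n P : Int) (w_list : List Int) (hlen : n ≤ w_list.length) :
    ∀ (t : Nat) (i : Int), 0 ≤ i → i < n →
      pvOuterA n P w_list t i = pvLoopL P t ((w_list.take n.toNat).drop i.toNat) := by
  intro t
  induction t with
  | zero => intro i h0 hn; rfl
  | succ t ih =>
    intro i h0 hn
    have hcorr := pvInnerA_corr n P w_list (w_list.length + 1) i 0 h0 hn hlen (by omega)
    simp only [pvOuterA, pvLoopL]
    rcases hcorr with ⟨ha, hw⟩ | ⟨i', ha, hw, h0', hn'⟩
    · rw [ha, hw]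
    · rw [ha, hw]
      exact ih i' h0' hn'

theorem pvLoopL_stuck (P w : Int) (ws : List Int) (hw : P < w) :
    ∀ t : Nat, pvLoopL P t (w :: ws) = 0 := by
  intro t
  induction t with
  | zero => rfl
  | succ t ih =>
    have : pvWalk P (w :: ws) 0 = Sum.inr (w :: ws) := by
      simp [pvWalk]; omega
    simp only [pvLoopL, this]
    exact ih

theorem pvMid_corr (P : Int) :
    ∀ (t : Nat) (s : List Int) (weight : Int), s ≠ [] →
      (match pvWalk P s weight with
        | Sum.inl r => r
        | Sum.inr s' => pvLoopL P t s') =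
      (match pvNeed? P s weight with
        | none => 0
        | some d => if d ≤ t then 1 else 0) := by
  intro t
  induction t with
  | zero =>
    intro s
    induction s with
    | nil => intro weight h; exact absurd rfl h
    | cons w ws ihs =>
      intro weight _
      by_cases hfit : weight + w ≤ P
      · simp only [pvWalk, pvNeed?, if_pos hfit]
        cases ws with
        | nil => simp [pvWalk, pvNeed?]
        | cons w' ws' => exact ihs (weight + w) (by simp)
      · simp only [pvWalk, pvNeed?, if_neg hfit]
        by_cases hbig : P < w
        · simp [hbig, pvLoopL]
        · simp only [if_neg hbig, pvLoopL]
          cases pvNeed? P ws w with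
          | none => rfl
          | some d => simp
  | succ t ih =>
    intro s
    induction s with
    | nil => intro weight h; exact absurd rfl h
    | cons w ws ihs =>
      intro weight _
      by_cases hfit : weight + w ≤ P
      · simp only [pvWalk, pvNeed?, if_pos hfit]
        cases ws with
        | nil => simp [pvWalk, pvNeed?]
        | cons w' ws' => exact ihs (weight + w) (by simp)
      · simp only [pvWalk, pvNeed?, if_neg hfit]
        by_cases hbig : P < w
        · simp only [if_pos hbig]
          exact pvLoopL_stuck P w ws hbig (t + 1)
        · simp only [if_neg hbig]
          have hw0 : 0 + w ≤ P := by omega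
          have hstep : pvLoopL P (t + 1) (w :: ws) =
              (match pvWalk P (w :: ws) 0 with
                | Sum.inl r => r
                | Sum.inr s' => pvLoopL P t s') := rfl
          rw [hstep, ih (w :: ws) 0 (by simp)]
          simp only [pvNeed?, if_pos hw0]
          have : (0 : Int) + w = w := by ring
          rw [this]
          cases pvNeed? P ws w with
          | none => rfl
          | some d =>
            simp only [Option.map_some]
            by_cases hd : d ≤ t
            · simp [hd, Nat.succ_le_succ hd]
            · have : ¬ (d + 1 ≤ t + 1) := by omega
              simp [hd, this]

theorem pvLoopL_corr (P : Int) (t : Nat) (s : List Int) (hs : s ≠ []) :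
    pvLoopL P t s =
      (match pvNeed? P s 0 with
        | none => 0
        | some d => if d + 1 ≤ t then 1 else 0) := by
  cases t with
  | zero =>
    simp only [pvLoopL]
    cases pvNeed? P s 0 with
    | none => rfl
    | some d => simp
  | succ t =>
    have : pvLoopL P (t + 1) s =
        (match pvWalk P s 0 with
          | Sum.inl r => r
          | Sum.inr s' => pvLoopL P t s') := rfl
    rw [this, pvMid_corr P t s 0 hs]
    cases pvNeed? P s 0 with
    | none => rfl
    | some d =>
      by_cases hd : d ≤ t
      · simp [hd, Nat.succ_le_succ hd]
      · have : ¬ (d + 1 ≤ t + 1) := by omega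
        simp [hd, this]

theorem pvGoB_nonpos (k P : Int) (hk : k ≤ 0) :
    ∀ (s : List Int) (trucks weight : Int), 1 ≤ trucks → pvGoB k P s trucks weight = 0 := by
  intro s
  induction s with
  | nil => intro trucks weight ht; simp [pvGoB]; omega
  | cons w ws ih =>
    intro trucks weight ht
    simp only [pvGoB]
    split_ifs with h1 h2
    · exact ih trucks (weight + w) ht
    · rfl
    · exact ih (trucks + 1) w (by omega)

theorem pvGoB_corr (k P : Int) :
    ∀ (s : List Int) (trucks weight : Int),
      pvGoB k P s trucks weight =
        (match pvNeed? P s weight with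
          | none => 0
          | some d => if trucks + d ≤ k then 1 else 0) := by
  intro s
  induction s with
  | nil => intro trucks weight; simp [pvGoB, pvNeed?]
  | cons w ws ih =>
    intro trucks weight
    by_cases hfit : weight + w ≤ P
    · simp only [pvGoB, pvNeed?, if_pos hfit]
      exact ih trucks (weight + w)
    · simp only [pvGoB, pvNeed?, if_neg hfit]
      by_cases hbig : P < w
      · simp [hbig]
      · simp only [if_neg hbig]
        rw [ih (trucks + 1) w]
        cases pvNeed? P ws w with
        | none => rfl
        | some d =>
          simp only [Option.map_some]
          have : trucks + ((d + 1 : Nat) : Int) = trucks + 1 + d := by push_cast; ring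
          rw [this]

-- ===== VERDICT (by name: the statement is the Claim_ definition above) =====
theorem unit_check_spec : Claim_equal_unit_check := by
  intro n k w_list P _ hpre
  unfold Spec_unit_check unit_check unit_check_alt
  rcases hpre with hk | ⟨h1, h2⟩
  · have hkz : k.toNat = 0 := by omega
    rw [hkz, pvGoB_nonpos k P hk _ 1 0 (by omega)]
    rfl
  have hslice : PySem.List.slice w_list none (some n) = w_list.take n.toNat :=
    PySem.List.slice_to w_list (by omega)
  rw [hslice]
  have hA := pvOuterA_corr n P w_list h2 k.toNat 0 (by omega) (by omega)
  simp only [Int.toNat_zero, List.drop_zero] at hA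
  rw [hA]
  have hne : w_list.take n.toNat ≠ [] := by
    have : (w_list.take n.toNat).length = n.toNat := by
      simp [List.length_take]; omega
    intro h; rw [h] at this; simp at this; omega
  rw [pvLoopL_corr P k.toNat (w_list.take n.toNat) hne,
      pvGoB_corr k P (w_list.take n.toNat) 1 0]
  cases pvNeed? P (w_list.take n.toNat) 0 with
  | none => rfl
  | some d =>
    by_cases hk : (1 : Int) + d ≤ k
    · have : d + 1 ≤ k.toNat := by omega
      simp [hk, this]
    · have : ¬ (d + 1 ≤ k.toNat) := by omega
      simp [hk, this]
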